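-- pv_equiv track=rewrite | github.com/Sohith2007/lc-remainder | backend/app/emailing.py | _description_preview
-- ===== SOURCE A (Python) =====
-- DESCRIPTION_LIMIT = 2200
--
-- def _description_preview(description: str) -> str:
--   lines = []
--   previous_blank = True
--   for raw_line in description.splitlines():
--     line = " ".join(raw_line.split())
--     if not line:
--       if not previous_blank:
--         lines.append("")
--       previous_blank = True
--       continue
--     lines.append(line)
--     previous_blank = False
--
--   preview = "\n".join(lines).strip()
--   if len(preview) <= DESCRIPTION_LIMIT:
--     return preview
--   return preview[: DESCRIPTION_LIMIT - 3].rstrip() + "..."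
-- ===== SOURCE B (Python) =====
-- DESCRIPTION_LIMIT = 2200
--
-- def _description_preview(description: str) -> str:
--     normalized = [" ".join(raw.split()) for raw in description.splitlines()]
--     paragraphs = []
--     current = []
--     for line in normalized:
--         if line:
--             current.append(line)
--         elif current:
--             paragraphs.append(current)
--             current = []
--     if current:
--         paragraphs.append(current)
--     preview = "\n\n".join("\n".join(p) for p in paragraphs)
--     if len(preview) <= DESCRIPTION_LIMIT:
--         return preview
--     return preview[: DESCRIPTION_LIMIT - 3].rstrip() + "..."
-- ===== Notes on version B (the rewrite author's own statement) =====
-- stated objective: simpler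
-- what changed: Replaces A's stateful single pass (previous_blank flag deciding when to emit separator blank lines, then a final strip) by a plain decomposition: normalize each line, group consecutive non-blank lines into paragraphs, and join the paragraphs with a double newline (no strip needed); truncation tail kept byte-for-byte.
import Mathlib
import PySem

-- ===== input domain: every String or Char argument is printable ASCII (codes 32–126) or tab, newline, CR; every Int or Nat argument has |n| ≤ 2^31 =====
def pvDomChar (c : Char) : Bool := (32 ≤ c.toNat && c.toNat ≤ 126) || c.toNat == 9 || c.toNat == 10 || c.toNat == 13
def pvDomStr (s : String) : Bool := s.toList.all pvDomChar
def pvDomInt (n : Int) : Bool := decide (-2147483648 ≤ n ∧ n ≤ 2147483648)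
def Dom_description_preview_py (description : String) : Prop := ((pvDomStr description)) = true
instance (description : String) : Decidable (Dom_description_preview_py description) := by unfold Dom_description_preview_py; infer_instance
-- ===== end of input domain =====

-- B replaces A's stateful previous_blank single pass by a plain normalize → group-into-paragraphs → join-with-"\n\n" decomposition (simpler; no strip needed, same values).

-- ===== PORT A =====
def DESCRIPTION_LIMIT : Int := 2200

def description_preview_py (description : String) : String :=
  let st := (PySem.Str.splitlines description).foldl
    (fun (st : List String × Bool) (raw_line : String) =>
      let line := PySem.Str.join " " (PySem.Str.split₀ raw_line)
      if line = "" then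
        ((if st.2 = false then st.1 ++ [""] else st.1), true)
      else
        (st.1 ++ [line], false))
    ([], true)
  let preview := PySem.Str.strip (PySem.Str.join "\n" st.1)
  if PySem.Str.len preview ≤ DESCRIPTION_LIMIT then preview
  else PySem.Str.rstrip (PySem.Str.slice preview none (some (DESCRIPTION_LIMIT - 3))) ++ "..."

-- ===== PORT B =====
def description_preview_py_alt (description : String) : String :=
  let normalized := (PySem.Str.splitlines description).map
    (fun raw => PySem.Str.join " " (PySem.Str.split₀ raw))
  let st := normalized.foldl
    (fun (st : List (List String) × List String) (line : String) =>
      if line ≠ "" then (st.1, st.2 ++ [line])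
      else if st.2 ≠ [] then (st.1 ++ [st.2], ([] : List String))
      else st)
    ([], [])
  let paragraphs := if st.2 ≠ [] then st.1 ++ [st.2] else st.1
  let preview := PySem.Str.join "\n\n" (paragraphs.map (fun p => PySem.Str.join "\n" p))
  if PySem.Str.len preview ≤ DESCRIPTION_LIMIT then preview
  else PySem.Str.rstrip (PySem.Str.slice preview none (some (DESCRIPTION_LIMIT - 3))) ++ "..."

-- ===== PRECONDITION & SPEC =====
def Spec_description_preview_py (description : String) (out : String) : Prop := out = description_preview_py_alt description
instance (description : String) (out : String) : Decidable (Spec_description_preview_py description out) := by unfold Spec_description_preview_py; infer_instance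

-- ===== CLAIM (what is proved, stated in full; the proofs are below) =====
def Claim_equal_description_preview_py : Prop := ∀ (description : String), Dom_description_preview_py description → Spec_description_preview_py description (description_preview_py description)

-- ===== LEMMAS AND PROOFS =====

-- a list of chars neither starting nor ending with whitespace (vacuous on [])
def pvGoodEnds (cs : List Char) : Prop :=
  (∀ c ∈ cs.head?, PySem.Chars.isspace c = false) ∧ (∀ c ∈ cs.getLast?, PySem.Chars.isspace c = false)

-- proof-side names for the two loop bodies and the normalization
def pvNorm (r : String) : String := PySem.Str.join " " (PySem.Str.split₀ r)

def pvAStep (st : List String × Bool) (line : String) : List String × Bool :=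
  if line = "" then ((if st.2 = false then st.1 ++ [""] else st.1), true)
  else (st.1 ++ [line], false)

def pvBStep (st : List (List String) × List String) (line : String) :
    List (List String) × List String :=
  if line ≠ "" then (st.1, st.2 ++ [line])
  else if st.2 ≠ [] then (st.1 ++ [st.2], ([] : List String))
  else st

-- the simulation relation between A's and B's loop states
def pvShape (lines : List String) (pb : Bool) (P : List (List String)) (C : List String) : Prop :=
  (C = [] ∧ P = [] ∧ pb = true ∧ lines = []) ∨
  (C = [] ∧ P ≠ [] ∧ pb = true ∧ lines = List.intercalate [""] P ++ [""]) ∨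
  (C ≠ [] ∧ pb = false ∧ lines = List.intercalate [""] (P ++ [C]))

def pvElem (s : String) : Prop := s ≠ "" ∧ pvGoodEnds s.toList

def pvInvB (P : List (List String)) (C : List String) : Prop :=
  (∀ p ∈ P, p ≠ [] ∧ ∀ s ∈ p, pvElem s) ∧ (∀ s ∈ C, pvElem s)

-- generic intercalate facts
theorem pvIntercalate_singleton {α : Type} (sep : List α) (x : List α) :
    List.intercalate sep [x] = x := by simp [List.intercalate]

theorem pvIntercalate_cons₂ {α : Type} (sep x y : List α) (zs : List (List α)) :
    List.intercalate sep (x :: y :: zs) = x ++ sep ++ List.intercalate sep (y :: zs) := by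
  simp [List.intercalate, List.intersperse]

theorem pvIntercalate_append {α : Type} (sep : List α) (xs ys : List (List α))
    (hx : xs ≠ []) (hy : ys ≠ []) :
    List.intercalate sep (xs ++ ys) = List.intercalate sep xs ++ sep ++ List.intercalate sep ys := by
  induction xs with
  | nil => exact absurd rfl hx
  | cons x xs ih =>
    cases xs with
    | nil =>
      cases ys with
      | nil => exact absurd rfl hy
      | cons y ys => simp [pvIntercalate_cons₂, pvIntercalate_singleton]
    | cons x' xs' =>
      have h := ih (by simp)
      rw [List.cons_append, pvIntercalate_cons₂, List.cons_append, pvIntercalate_cons₂]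
      rw [List.cons_append] at h
      rw [h]; simp

theorem pvIntercalate_ne_nil {α : Type} (sep : List α) (G : List (List α))
    (hne : G ≠ []) (h : ∀ g ∈ G, g ≠ []) : List.intercalate sep G ≠ [] := by
  cases G with
  | nil => exact absurd rfl hne
  | cons g gs =>
    cases gs with
    | nil => simpa [pvIntercalate_singleton] using h g (by simp)
    | cons g' gs' =>
      rw [pvIntercalate_cons₂]
      have := h g (by simp)
      simp [this]

theorem pvIntercalate_concat_last {α : Type} (sep : List α) (P : List (List α)) (C t : List α) :
    List.intercalate sep (P ++ [C ++ t]) = List.intercalate sep (P ++ [C]) ++ t := by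
  cases P with
  | nil => simp [pvIntercalate_singleton]
  | cons p P' =>
    rw [pvIntercalate_append sep (p :: P') [C ++ t] (by simp) (by simp),
        pvIntercalate_append sep (p :: P') [C] (by simp) (by simp)]
    simp [pvIntercalate_singleton]

theorem pvMap_intercalate {α β : Type} (f : α → β) (sep : List α) (G : List (List α)) :
    (List.intercalate sep G).map f = List.intercalate (sep.map f) (G.map (fun g => g.map f)) := by
  induction G with
  | nil => simp [List.intercalate]
  | cons g gs ih =>
    cases gs with
    | nil => simp [pvIntercalate_singleton]
    | cons g' gs' =>
      rw [pvIntercalate_cons₂]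
      simp only [List.map_append, List.map_cons, ih]
      rw [pvIntercalate_cons₂ (List.map f sep) (List.map f g) (List.map f g')
            (List.map (fun g => List.map f g) gs')]

-- the blank-separator identity behind the rewrite
theorem pvInterBlank (nl : List Char) (G : List (List (List Char))) (h : ∀ g ∈ G, g ≠ []) :
    List.intercalate nl (List.intercalate [[]] G)
      = List.intercalate (nl ++ nl) (G.map (List.intercalate nl)) := by
  induction G with
  | nil => simp [List.intercalate]
  | cons g gs ih =>
    cases gs with
    | nil => simp [pvIntercalate_singleton]
    | cons g' gs' =>
      have hg : g ≠ [] := h g (by simp)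
      have hI : List.intercalate [[]] (g' :: gs') ≠ ([] : List (List Char)) :=
        pvIntercalate_ne_nil _ _ (by simp) (fun x hx => h x (by simp [hx]))
      obtain ⟨i, I', hII⟩ := List.exists_cons_of_ne_nil hI
      rw [pvIntercalate_cons₂ [[]] g g' gs', List.append_assoc]
      rw [pvIntercalate_append nl g (([[]] : List (List Char)) ++ List.intercalate [[]] (g' :: gs')) hg (by simp)]
      have h2 : (([[]] : List (List Char)) ++ List.intercalate [[]] (g' :: gs'))
          = [] :: i :: I' := by simp [hII]
      rw [h2, pvIntercalate_cons₂ nl [] i I', ← hII,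
          ih (fun x hx => h x (by simp [hx]))]
      simp only [List.map_cons]
      rw [pvIntercalate_cons₂ (nl ++ nl) (nl.intercalate g)]
      simp [List.append_assoc]

-- join of nonempty good parts is good (and nonempty)
theorem pvJoinGood (sep : List Char) (parts : List (List Char))
    (h : ∀ p ∈ parts, p ≠ [] ∧ pvGoodEnds p) :
    pvGoodEnds (List.intercalate sep parts) ∧ (parts ≠ [] → List.intercalate sep parts ≠ []) := by
  induction parts with
  | nil => refine ⟨⟨by simp [List.intercalate], by simp [List.intercalate]⟩, fun h => absurd rfl h⟩
  | cons p ps ih =>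
    obtain ⟨hp, hgp⟩ := h p (by simp)
    have ih' := ih (fun q hq => h q (by simp [hq]))
    cases ps with
    | nil =>
      exact ⟨by simpa [pvIntercalate_singleton] using hgp,
        fun _ => by simpa [pvIntercalate_singleton] using hp⟩
    | cons p2 ps' =>
      have hJ : List.intercalate sep (p2 :: ps') ≠ [] := ih'.2 (by simp)
      rw [pvIntercalate_cons₂]
      constructor
      · constructor
        · rw [List.append_assoc, List.head?_append_of_ne_nil _ hp]
          exact hgp.1
        · rw [List.getLast?_append_of_ne_nil _ hJ]
          exact ih'.1.2
      · intro _
        simp [hp]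

-- split() tokens are nonempty and whitespace-free
theorem pvSplit₀_go_tokens (s : List Char) : ∀ (cur : List Char) (acc : List (List Char)),
    (∀ c ∈ cur, PySem.Chars.isspace c = false) →
    (∀ u ∈ acc, u ≠ [] ∧ ∀ c ∈ u, PySem.Chars.isspace c = false) →
    ∀ t ∈ PySem.Chars.split₀.go s cur acc, t ≠ [] ∧ ∀ c ∈ t, PySem.Chars.isspace c = false := by
  induction s with
  | nil =>
    intro cur acc hcur hacc t ht
    rw [PySem.Chars.split₀.go.eq_def] at ht
    by_cases hc : cur.isEmpty
    · simp [hc] at ht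
      exact hacc t ht
    · simp [hc] at ht
      rcases ht with h | h
      all_goals first
        | exact hacc t h
        | (subst h
           exact ⟨by simpa [List.isEmpty_iff] using hc,
             fun c' hc' => hcur c' (by simpa using hc')⟩)
  | cons c rest ih =>
    intro cur acc hcur hacc t ht
    rw [PySem.Chars.split₀.go.eq_def] at ht
    by_cases hs : PySem.Chars.isspace c
    · by_cases hc : cur.isEmpty
      · simp [hs, hc] at ht
        exact ih [] acc (by simp) hacc t ht
      · simp [hs, hc] at ht
        refine ih [] (cur.reverse :: acc) (by simp) ?_ t ht
        intro u hu
        rcases List.mem_cons.mp hu with h | h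
        · subst h
          exact ⟨by simpa [List.isEmpty_iff] using hc,
            fun c' hc' => hcur c' (by simpa using hc')⟩
        · exact hacc u h
    · simp [hs] at ht
      refine ih (c :: cur) acc ?_ hacc t ht
      intro c' hc'
      rcases List.mem_cons.mp hc' with h | h
      · subst h; simpa using hs
      · exact hcur c' h

theorem pvSplit₀_tokens (s : List Char) :
    ∀ t ∈ PySem.Chars.split₀ s, t ≠ [] ∧ ∀ c ∈ t, PySem.Chars.isspace c = false :=
  pvSplit₀_go_tokens s [] [] (by simp) (by simp)

-- strip is the identity on good strings
theorem pvStrip_good (cs : List Char) (h : pvGoodEnds cs) : PySem.Chars.strip cs = cs := by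
  have hl : PySem.Chars.lstrip cs = cs := by
    unfold PySem.Chars.lstrip
    cases hcs : cs with
    | nil => simp
    | cons c r =>
      have hc := h.1 c (by simp [hcs])
      simp [hc]
  have hr : List.dropWhile PySem.Chars.isspace cs.reverse = cs.reverse := by
    cases hrev : cs.reverse with
    | nil => simp
    | cons c r =>
      have h0 : cs.getLast? = some c := by
        rw [List.getLast?_eq_head?_reverse, hrev]; rfl
      have hc := h.2 c (by simp [h0])
      simp [hc]
  unfold PySem.Chars.strip PySem.Chars.rstrip
  rw [hl, hr, List.reverse_reverse]

theorem pvRstrip_newline (cs : List Char) :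
    PySem.Chars.rstrip (cs ++ ['\n']) = PySem.Chars.rstrip cs := by
  unfold PySem.Chars.rstrip
  rw [List.reverse_append]
  simp [PySem.Chars.isspace]

theorem pvStrip_newline (cs : List Char) :
    PySem.Chars.strip (cs ++ ['\n']) = PySem.Chars.strip cs := by
  unfold PySem.Chars.strip PySem.Chars.lstrip
  rw [List.dropWhile_append]
  by_cases h : (List.dropWhile PySem.Chars.isspace cs).isEmpty
  · rw [if_pos h]
    have h' : List.dropWhile PySem.Chars.isspace cs = [] := by simpa [List.isEmpty_iff] using h
    rw [h']
    simp [PySem.Chars.rstrip, PySem.Chars.isspace]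
  · rw [if_neg h, pvRstrip_newline]

-- normalized lines are good
theorem pvNorm_good (r : String) : pvGoodEnds (pvNorm r).toList := by
  unfold pvNorm
  rw [PySem.Str.toList_join, PySem.Str.split₀_map_toList]
  have := pvJoinGood " ".toList (PySem.Chars.split₀ r.toList) ?_
  · simpa [PySem.Chars.join] using this.1
  · intro t ht
    obtain ⟨h1, h2⟩ := pvSplit₀_tokens r.toList t ht
    refine ⟨h1, ?_, ?_⟩
    · intro c hc
      exact h2 c (by
        cases t with
        | nil => simp at hc
        | cons a t' => simp at hc; simp [hc])
    · intro c hc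
      exact h2 c (List.mem_of_getLast? (by simpa using hc))

-- one step of the simulation
theorem pvStep_sim (line : String) (hg : pvGoodEnds line.toList)
    (lines : List String) (pb : Bool) (P : List (List String)) (C : List String)
    (hs : pvShape lines pb P C) (hi : pvInvB P C) :
    pvShape (pvAStep (lines, pb) line).1 (pvAStep (lines, pb) line).2
        (pvBStep (P, C) line).1 (pvBStep (P, C) line).2 ∧
      pvInvB (pvBStep (P, C) line).1 (pvBStep (P, C) line).2 := by
  by_cases hline : line = ""
  · subst hline
    rcases hs with ⟨hC, hP, hpb, hlines⟩ | ⟨hC, hP, hpb, hlines⟩ | ⟨hC, hpb, hlines⟩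
    · subst hC hP hpb hlines
      simp [pvAStep, pvBStep, pvShape, pvInvB]
    · subst hC hpb hlines
      refine ⟨?_, ?_⟩
      · simp [pvAStep, pvBStep, pvShape, hP]
      · simpa [pvBStep, pvInvB] using hi
    · have hA : pvAStep (lines, pb) "" = (lines ++ [""], true) := by
        simp [pvAStep, hpb]
      have hB : pvBStep (P, C) "" = (P ++ [C], []) := by
        simp [pvBStep, hC]
      rw [hA, hB]
      refine ⟨?_, ?_, by simp⟩
      · simp only [pvShape]
        exact Or.inr (Or.inl ⟨by trivial, by simp, by trivial, by rw [hlines]⟩)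
      · intro p hp
        rcases List.mem_append.mp hp with h | h
        · exact hi.1 p h
        · simp at h; subst h; exact ⟨hC, hi.2⟩
  · have helem : pvElem line := ⟨hline, hg⟩
    have hA : pvAStep (lines, pb) line = (lines ++ [line], false) := by
      simp [pvAStep, hline]
    have hB : pvBStep (P, C) line = (P, C ++ [line]) := by
      simp [pvBStep, hline]
    rw [hA, hB]
    refine ⟨?_, ⟨hi.1, ?_⟩⟩
    · rcases hs with ⟨hC, hP, hpb, hlines⟩ | ⟨hC, hP, hpb, hlines⟩ | ⟨hC, hpb, hlines⟩
      · subst hC hP hpb hlines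
        simp only [pvShape]
        exact Or.inr (Or.inr ⟨by simp, by trivial, by simp [pvIntercalate_singleton]⟩)
      · subst hC hpb hlines
        simp only [pvShape]
        refine Or.inr (Or.inr ⟨by simp, by trivial, ?_⟩)
        have h := pvIntercalate_append [""] P [[line]] hP (by simp)
        simp [h, pvIntercalate_singleton, List.append_assoc]
      · simp only [pvShape]
        refine Or.inr (Or.inr ⟨by simp, by trivial, ?_⟩)
        rw [hlines, pvIntercalate_concat_last]
    · intro s hs'
      rcases List.mem_append.mp hs' with h | h
      · exact hi.2 s h
      · simp at h; subst h; exact helem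

-- the whole loop preserves the simulation
theorem pvFold_sim (ns : List String) (hns : ∀ s ∈ ns, pvGoodEnds s.toList) :
    ∀ (lines : List String) (pb : Bool) (P : List (List String)) (C : List String),
      pvShape lines pb P C → pvInvB P C →
      pvShape (ns.foldl pvAStep (lines, pb)).1 (ns.foldl pvAStep (lines, pb)).2
          (ns.foldl pvBStep (P, C)).1 (ns.foldl pvBStep (P, C)).2 ∧
        pvInvB (ns.foldl pvBStep (P, C)).1 (ns.foldl pvBStep (P, C)).2 := by
  induction ns with
  | nil => intro lines pb P C hs hi; exact ⟨hs, hi⟩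
  | cons n ns' ih =>
    intro lines pb P C hs hi
    have hstep := pvStep_sim n (hns n (by simp)) lines pb P C hs hi
    simp only [List.foldl_cons]
    have := ih (fun s h => hns s (by simp [h]))
      (pvAStep (lines, pb) n).1 (pvAStep (lines, pb) n).2
      (pvBStep (P, C) n).1 (pvBStep (P, C) n).2 hstep.1 hstep.2
    simpa using this

-- good parts list for a group list
theorem pvParts_good (G : List (List String)) (hG : ∀ p ∈ G, p ≠ [] ∧ ∀ s ∈ p, pvElem s) :
    ∀ q ∈ (G.map (fun g => g.map String.toList)).map (List.intercalate ['\n']),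
      q ≠ [] ∧ pvGoodEnds q := by
  intro q hq
  simp only [List.map_map, List.mem_map, Function.comp] at hq
  obtain ⟨p, hp, rfl⟩ := hq
  obtain ⟨hpne, hps⟩ := hG p hp
  have hjg := pvJoinGood ['\n'] (p.map String.toList) ?_
  · exact ⟨hjg.2 (by simpa using hpne), hjg.1⟩
  · intro cs hcs
    obtain ⟨s, hs, rfl⟩ := List.mem_map.mp hcs
    obtain ⟨hsne, hsg⟩ := hps s hs
    exact ⟨by simpa using hsne, hsg⟩

-- the final rendering identity: strip ∘ join "\n" ∘ intercalate [""] = join "\n\n" ∘ map (join "\n")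
theorem pvFinal (G : List (List String)) (hG : ∀ p ∈ G, p ≠ [] ∧ ∀ s ∈ p, pvElem s) :
    PySem.Chars.strip (PySem.Chars.join "\n".toList ((List.intercalate [""] G).map String.toList))
      = PySem.Chars.join "\n\n".toList
          ((G.map (fun p => PySem.Str.join "\n" p)).map String.toList) := by
  have hmap : (List.intercalate [""] G).map String.toList
      = List.intercalate [[]] (G.map (fun g => g.map String.toList)) := by
    simpa using pvMap_intercalate String.toList [""] G
  have hPc : ∀ g ∈ G.map (fun g => g.map String.toList), g ≠ ([] : List (List Char)) := by
    intro g hg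
    obtain ⟨p, hp, rfl⟩ := List.mem_map.mp hg
    simpa using (hG p hp).1
  have hnl : ("\n".toList : List Char) = ['\n'] := rfl
  have hnl2 : ("\n\n".toList : List Char) = ['\n'] ++ ['\n'] := rfl
  rw [hmap]
  simp only [PySem.Chars.join, hnl, hnl2]
  rw [pvInterBlank ['\n'] _ hPc]
  rw [pvStrip_good _ (pvJoinGood (['\n'] ++ ['\n']) _ (pvParts_good G hG)).1]
  congr 1
  simp only [List.map_map]
  apply List.map_congr_left
  intro p _
  simp [Function.comp, PySem.Str.toList_join, PySem.Chars.join, hnl]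

-- A's preview equals B's preview
theorem pvPreview (d : String) :
    PySem.Str.strip (PySem.Str.join "\n"
        (((PySem.Str.splitlines d).map pvNorm).foldl pvAStep ([], true)).1)
      = PySem.Str.join "\n\n"
          ((if (((PySem.Str.splitlines d).map pvNorm).foldl pvBStep ([], [])).2 ≠ [] then
              (((PySem.Str.splitlines d).map pvNorm).foldl pvBStep ([], [])).1
                ++ [(((PySem.Str.splitlines d).map pvNorm).foldl pvBStep ([], [])).2]
            else (((PySem.Str.splitlines d).map pvNorm).foldl pvBStep ([], [])).1).map
            (fun p => PySem.Str.join "\n" p)) := by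
  have hns : ∀ s ∈ (PySem.Str.splitlines d).map pvNorm, pvGoodEnds s.toList := by
    intro s hs
    obtain ⟨r, _, rfl⟩ := List.mem_map.mp hs
    exact pvNorm_good r
  obtain ⟨hshape, hinv⟩ := pvFold_sim ((PySem.Str.splitlines d).map pvNorm) hns
    [] true [] [] (Or.inl ⟨rfl, rfl, rfl, rfl⟩) ⟨by simp, by simp⟩
  set a := ((PySem.Str.splitlines d).map pvNorm).foldl pvAStep ([], true) with ha
  set b := ((PySem.Str.splitlines d).map pvNorm).foldl pvBStep ([], []) with hb
  apply String.toList_inj.mp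
  rw [PySem.Str.toList_strip, PySem.Str.toList_join, PySem.Str.toList_join]
  rcases hshape with ⟨hC, hP, _, hlines⟩ | ⟨hC, hP, _, hlines⟩ | ⟨hC, _, hlines⟩
  · rw [hC, hP, hlines]
    simp [PySem.Chars.strip, PySem.Chars.lstrip, PySem.Chars.rstrip]
  · -- trailing blank line: lines = intercalate [""] b.1 ++ [""]
    rw [hC, hlines]
    have hXne : List.intercalate [""] b.1 ≠ [] :=
      pvIntercalate_ne_nil [""] b.1 hP (fun g hg => (hinv.1 g hg).1)
    have hsplit : (List.intercalate [""] b.1 ++ [""]).map String.toList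
        = (List.intercalate [""] b.1).map String.toList ++ [[]] := by simp
    rw [hsplit]
    have hj : PySem.Chars.join "\n".toList
          ((List.intercalate [""] b.1).map String.toList ++ [[]])
        = PySem.Chars.join "\n".toList ((List.intercalate [""] b.1).map String.toList)
            ++ ['\n'] := by
      simp only [PySem.Chars.join]
      rw [pvIntercalate_append "\n".toList _ [[]]
        (by simpa using hXne) (by simp), pvIntercalate_singleton]
      simp
    rw [hj, pvStrip_newline]
    simp only [ne_eq, not_true_eq_false, if_false]
    exact pvFinal b.1 hinv.1
  · rw [hlines]
    simp only [hC, ne_eq, not_false_eq_true, if_true]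
    refine pvFinal (b.1 ++ [b.2]) ?_
    intro p hp
    rcases List.mem_append.mp hp with h | h
    · exact hinv.1 p h
    · simp at h; subst h; exact ⟨hC, hinv.2⟩

-- ===== VERDICT (by name: the statement is the Claim_ definition above) =====
theorem description_preview_py_spec : Claim_equal_description_preview_py := by
  intro d _hd
  unfold Spec_description_preview_py
  have hA : (PySem.Str.splitlines d).foldl
      (fun (st : List String × Bool) (raw_line : String) =>
        let line := PySem.Str.join " " (PySem.Str.split₀ raw_line)
        if line = "" then
          ((if st.2 = false then st.1 ++ [""] else st.1), true)
        else
          (st.1 ++ [line], false)) ([], true)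
      = ((PySem.Str.splitlines d).map pvNorm).foldl pvAStep ([], true) := by
    rw [List.foldl_map]
    rfl
  have hB : ((PySem.Str.splitlines d).map
        (fun raw => PySem.Str.join " " (PySem.Str.split₀ raw))).foldl
      (fun (st : List (List String) × List String) (line : String) =>
        if line ≠ "" then (st.1, st.2 ++ [line])
        else if st.2 ≠ [] then (st.1 ++ [st.2], ([] : List String))
        else st) ([], [])
      = ((PySem.Str.splitlines d).map pvNorm).foldl pvBStep ([], []) := rfl
  simp only [description_preview_py, description_preview_py_alt]
  rw [hA, hB, pvPreview d]
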